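-- pv_equiv track=rewrite | github.com/mischas114/tsPatternEA | src/labeling.py | group_waves_into_heartbeats
-- ===== SOURCE A (Python) =====
-- from typing import List
--
-- def group_waves_into_heartbeats(peaks: List[int], labels_per_peak):
--     """Return list of dicts – one per heartbeat."""
--     beats = []
--     for p_idx, lab in zip(peaks, labels_per_peak):
--         if not lab:
--             continue
--         letter = ''.join(filter(str.isalpha, lab))
--         beat_no = int(''.join(filter(str.isdigit, lab))) - 1
--         while len(beats) <= beat_no:
--             beats.append({})
--         beats[beat_no][letter] = p_idx
--     return beats
-- ===== SOURCE B (Python) =====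
-- def group_waves_into_heartbeats(peaks, labels_per_peak):
--     """Return list of dicts - one per heartbeat."""
--     triples = []
--     max_beat = -1
--     for p_idx, lab in zip(peaks, labels_per_peak):
--         if not lab:
--             continue
--         letter = ''.join(c for c in lab if c.isalpha())
--         beat_no = int(''.join(c for c in lab if c.isdigit())) - 1
--         triples.append((beat_no, letter, p_idx))
--         if beat_no > max_beat:
--             max_beat = beat_no
--     result = [{} for _ in range(max_beat + 1)]
--     for beat_no, letter, p_idx in triples:
--         result[beat_no][letter] = p_idx
--     return result
-- ===== Notes on version B (the rewrite author's own statement) =====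
-- stated objective: alternative
-- what changed: A grows the beats list incrementally inside the loop (while len<=beat_no append) and writes as it goes; B first collects parsed (beat_no, letter, peak) triples while tracking the maximum beat number, then preallocates the whole table of empty dicts and fills it in a second pass.
import Mathlib
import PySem

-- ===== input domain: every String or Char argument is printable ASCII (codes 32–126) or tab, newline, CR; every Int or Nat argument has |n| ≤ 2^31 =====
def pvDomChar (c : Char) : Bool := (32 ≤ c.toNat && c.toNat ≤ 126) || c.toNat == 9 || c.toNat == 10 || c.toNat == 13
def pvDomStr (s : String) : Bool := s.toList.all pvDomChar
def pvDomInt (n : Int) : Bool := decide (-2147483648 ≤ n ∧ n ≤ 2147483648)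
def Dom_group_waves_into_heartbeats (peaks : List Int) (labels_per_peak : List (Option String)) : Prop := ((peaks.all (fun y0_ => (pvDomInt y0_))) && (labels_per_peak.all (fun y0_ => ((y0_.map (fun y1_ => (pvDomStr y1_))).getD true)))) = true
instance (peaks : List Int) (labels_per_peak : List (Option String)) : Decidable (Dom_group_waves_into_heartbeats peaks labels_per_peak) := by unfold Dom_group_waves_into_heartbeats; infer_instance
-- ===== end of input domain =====

-- B replaces A's incremental grow-while-writing loop by a collect-triples pass followed by a
-- preallocated table filled in a second pass (same cost, different decomposition).


-- ===== PORT A =====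
-- shared parsing of one non-empty label, as both Pythons compute it:
-- letter = ''.join(alpha chars), beat_no = int(''.join(digit chars)) - 1
-- (int('') raises ValueError in Python; the `getD 0` total form is only reachable outside Pre_)
def pvParseLab (s : String) : String × Int :=
  (String.mk (s.toList.filter PySem.Chars.isalpha),
   (PySem.Int.ofStr? (String.mk (s.toList.filter PySem.Chars.isdigit))).getD 0 - 1)

-- beats[beat_no][letter] = p_idx  (none = IndexError, unreachable inside Pre_)
def pvSetItem (bs : List (PySem.Dict String Int)) (n : Int) (letter : String) (p : Int) :
    List (PySem.Dict String Int) :=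
  match PySem.List.pyGet? bs n with
  | some d => PySem.List.pySetD bs n (d.insert letter p)
  | none => bs

-- while len(beats) <= beat_no: beats.append({})
def pvGrowA (bs : List (PySem.Dict String Int)) (n : Int) : List (PySem.Dict String Int) :=
  if h : (bs.length : Int) ≤ n then pvGrowA (bs ++ [PySem.Dict.empty]) n else bs
termination_by (n + 1 - bs.length).toNat
decreasing_by simp only [List.length_append, List.length_cons, List.length_nil]; omega

def pvStepA (bs : List (PySem.Dict String Int)) (pp : Int × Option String) :
    List (PySem.Dict String Int) :=
  match pp.2 with
  | none => bs
  | some s =>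
      if s = "" then bs
      else
        let q := pvParseLab s
        pvSetItem (pvGrowA bs q.2) q.2 q.1 pp.1

def group_waves_into_heartbeats (peaks : List Int) (labels_per_peak : List (Option String)) :
    List (List (String × Int)) :=
  (((peaks.zip labels_per_peak).foldl pvStepA []).map (fun d => d.items))

-- ===== PORT B =====
-- pass 1: collect (beat_no, letter, p_idx) triples and the maximum beat number
def pvStepB (acc : List (Int × String × Int) × Int) (pp : Int × Option String) :
    List (Int × String × Int) × Int :=
  match pp.2 with
  | none => acc
  | some s =>
      if s = "" then acc
      else
        let q := pvParseLab s
        (acc.1 ++ [(q.2, q.1, pp.1)], if q.2 > acc.2 then q.2 else acc.2)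

def group_waves_into_heartbeats_alt (peaks : List Int) (labels_per_peak : List (Option String)) :
    List (List (String × Int)) :=
  let r := (peaks.zip labels_per_peak).foldl pvStepB ([], -1)
  ((r.1.foldl (fun bs t => pvSetItem bs t.1 t.2.1 t.2.2)
      (List.replicate (r.2 + 1).toNat PySem.Dict.empty)).map (fun d => d.items))

-- ===== PRECONDITION & SPEC =====
-- Pre_ excludes inputs with a non-empty label whose digit part is empty (int('') raises ValueError
-- in both A and B) or has numeric value 0: there A's behaviour at the negative beat index -1
-- (IndexError, or a write into whichever dict happens to be last at that moment) is an accident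
-- of its incremental growth order.
def Pre_group_waves_into_heartbeats (peaks : List Int) (labels_per_peak : List (Option String)) : Prop :=
  ∀ pp ∈ peaks.zip labels_per_peak, ∀ s : String, pp.2 = some s → s ≠ "" →
    (s.toList.filter PySem.Chars.isdigit ≠ [] ∧
     1 ≤ (PySem.Int.ofStr? (String.mk (s.toList.filter PySem.Chars.isdigit))).getD 0)
instance (peaks : List Int) (labels_per_peak : List (Option String)) : Decidable (Pre_group_waves_into_heartbeats peaks labels_per_peak) := by unfold Pre_group_waves_into_heartbeats; infer_instance

def pvWitness_group_waves_into_heartbeats : List Int × List (Option String) :=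
  ([5, 7], [some "P1", some "T2"])

def Spec_group_waves_into_heartbeats (peaks : List Int) (labels_per_peak : List (Option String)) (out : List (List (String × Int))) : Prop := out = group_waves_into_heartbeats_alt peaks labels_per_peak
instance (peaks : List Int) (labels_per_peak : List (Option String)) (out : List (List (String × Int))) : Decidable (Spec_group_waves_into_heartbeats peaks labels_per_peak out) := by unfold Spec_group_waves_into_heartbeats; infer_instance

-- ===== CLAIM (what is proved, stated in full; the proofs are below) =====
def Claim_equal_group_waves_into_heartbeats : Prop := ∀ (peaks : List Int) (labels_per_peak : List (Option String)), Dom_group_waves_into_heartbeats peaks labels_per_peak → Pre_group_waves_into_heartbeats peaks labels_per_peak → Spec_group_waves_into_heartbeats peaks labels_per_peak (group_waves_into_heartbeats peaks labels_per_peak)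

-- ===== LEMMAS AND PROOFS =====

-- the parsed triples of the zipped input (what both loops actually act on)
def pvTriples (l : List (Int × Option String)) : List (Int × String × Int) :=
  l.filterMap (fun pp =>
    match pp.2 with
    | none => none
    | some s => if s = "" then none else some ((pvParseLab s).2, (pvParseLab s).1, pp.1))

-- target table length for a triple list, starting from k
def pvL (ts : List (Int × String × Int)) (k : Nat) : Nat :=
  ts.foldl (fun m t => max m (t.1.toNat + 1)) k

theorem pvL_ge (ts : List (Int × String × Int)) (k : Nat) : k ≤ pvL ts k := by
  induction ts generalizing k with
  | nil => simp [pvL]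
  | cons t ts ih =>
      simp only [pvL, List.foldl_cons] at *
      exact le_trans (le_max_left _ _) (ih _)

theorem pvGrowA_eq (bs : List (PySem.Dict String Int)) (n : Int) :
    pvGrowA bs n = bs ++ List.replicate (n + 1 - bs.length).toNat PySem.Dict.empty := by
  induction bs using pvGrowA.induct (n := n) with
  | case1 bs h ih =>
      rw [pvGrowA, dif_pos h, ih]
      have h2 : (n + 1 - ((bs ++ [PySem.Dict.empty]).length : Int)).toNat + 1 = (n + 1 - bs.length).toNat := by
        simp only [List.length_append, List.length_cons, List.length_nil]; omega
      rw [← h2, List.replicate_succ, List.append_assoc]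
      rfl
  | case2 bs h =>
      rw [pvGrowA, dif_neg h]
      have h0 : (n + 1 - (bs.length : Int)).toNat = 0 := by omega
      simp [h0]

theorem pvSetItem_eq (bs : List (PySem.Dict String Int)) (n : Int) (l : String) (p : Int)
    (h0 : 0 ≤ n) (h : n.toNat < bs.length) :
    pvSetItem bs n l p = bs.set n.toNat ((bs[n.toNat]).insert l p) := by
  have hg : PySem.List.pyGet? bs n = some (bs[n.toNat]) := by
    rw [PySem.List.pyGet?_of_nonneg bs h0, List.getElem?_eq_getElem h]
  unfold pvSetItem
  rw [hg]; simp [PySem.List.pySetD_of_nonneg bs _ h0]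

theorem pvSetItem_length (bs : List (PySem.Dict String Int)) (n : Int) (l : String) (p : Int) :
    (pvSetItem bs n l p).length = bs.length := by
  unfold pvSetItem
  cases hg : PySem.List.pyGet? bs n with
  | none => rfl
  | some d => simp [PySem.List.length_pySetD]

theorem pvSetItem_append (bs rs : List (PySem.Dict String Int)) (n : Int) (l : String) (p : Int)
    (h0 : 0 ≤ n) (h : n.toNat < bs.length) :
    pvSetItem (bs ++ rs) n l p = pvSetItem bs n l p ++ rs := by
  rw [pvSetItem_eq _ _ _ _ h0 (by simp; omega), pvSetItem_eq _ _ _ _ h0 h,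
      List.getElem_append_left h, List.set_append_left _ _ h]

-- main invariant: grow-as-you-go equals preallocate-then-fill
theorem pvMain (ts : List (Int × String × Int)) (bs : List (PySem.Dict String Int))
    (h : ∀ t ∈ ts, 0 ≤ t.1) :
    ts.foldl (fun b t => pvSetItem (pvGrowA b t.1) t.1 t.2.1 t.2.2) bs
      = ts.foldl (fun b t => pvSetItem b t.1 t.2.1 t.2.2)
          (bs ++ List.replicate (pvL ts bs.length - bs.length) PySem.Dict.empty) := by
  induction ts generalizing bs with
  | nil => simp [pvL]
  | cons t ts ih =>
      obtain ⟨n, l, p⟩ := t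
      have hn : 0 ≤ n := h (n, l, p) (by simp)
      have hts : ∀ t ∈ ts, 0 ≤ t.1 := fun t ht => h t (List.mem_cons_of_mem _ ht)
      set k1 := (n + 1 - (bs.length : Int)).toNat with hk1
      have hg : pvGrowA bs n = bs ++ List.replicate k1 PySem.Dict.empty := pvGrowA_eq bs n
      have hglen : (pvGrowA bs n).length = max bs.length (n.toNat + 1) := by
        rw [hg]; simp only [List.length_append, List.length_replicate]; omega
      set M := max bs.length (n.toNat + 1) with hM
      have hb1len : (pvSetItem (pvGrowA bs n) n l p).length = M := by
        rw [pvSetItem_length, hglen]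
      have hLcons : pvL ((n, l, p) :: ts) bs.length = pvL ts M := by
        simp only [pvL, List.foldl_cons, ← hM]
      have hge : M ≤ pvL ts M := pvL_ge ts M
      simp only [List.foldl_cons]
      rw [ih _ hts, hb1len, hLcons]
      congr 1
      have hsplit : pvL ts M - bs.length = k1 + (pvL ts M - M) := by omega
      rw [hsplit, List.replicate_add, ← List.append_assoc, ← hg]
      rw [pvSetItem_append _ _ _ _ _ hn (by rw [hglen]; omega)]

theorem pvFoldA (l : List (Int × Option String)) (bs : List (PySem.Dict String Int)) :
    l.foldl pvStepA bs
      = (pvTriples l).foldl (fun b t => pvSetItem (pvGrowA b t.1) t.1 t.2.1 t.2.2) bs := by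
  induction l generalizing bs with
  | nil => rfl
  | cons pp l ih =>
      obtain ⟨p, lab⟩ := pp
      cases lab with
      | none => simp only [List.foldl_cons, pvTriples, List.filterMap_cons]; exact ih _
      | some s =>
          by_cases hs : s = ""
          · simp only [List.foldl_cons, pvTriples, List.filterMap_cons, pvStepA, hs]
            simpa [pvTriples] using ih _
          · simp only [List.foldl_cons, pvTriples, List.filterMap_cons, pvStepA, hs]
            simpa [pvTriples, hs] using ih _

theorem pvFoldB (l : List (Int × Option String)) (acc : List (Int × String × Int) × Int) :
    l.foldl pvStepB acc
      = (acc.1 ++ pvTriples l, (pvTriples l).foldl (fun m t => if t.1 > m then t.1 else m) acc.2) := by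
  induction l generalizing acc with
  | nil => simp [pvTriples]
  | cons pp l ih =>
      obtain ⟨p, lab⟩ := pp
      cases lab with
      | none => simp only [List.foldl_cons, pvTriples, List.filterMap_cons, pvStepB]
                simpa [pvTriples] using ih _
      | some s =>
          by_cases hs : s = ""
          · simp only [List.foldl_cons, pvTriples, List.filterMap_cons, pvStepB, hs]
            simpa [pvTriples] using ih _
          · simp only [List.foldl_cons, pvTriples, List.filterMap_cons, pvStepB, hs]
            rw [ih _]
            simp [pvTriples]

theorem pvMaxNat (ts : List (Int × String × Int)) (i : Int) (hi : -1 ≤ i)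
    (h : ∀ t ∈ ts, 0 ≤ t.1) :
    (ts.foldl (fun m t => if t.1 > m then t.1 else m) i + 1).toNat = pvL ts (i + 1).toNat := by
  induction ts generalizing i with
  | nil => simp [pvL]
  | cons t ts ih =>
      have ht : 0 ≤ t.1 := h t (by simp)
      have hts : ∀ u ∈ ts, 0 ≤ u.1 := fun u hu => h u (List.mem_cons_of_mem _ hu)
      simp only [List.foldl_cons, pvL]
      rw [ih _ (by split <;> omega) hts]
      have heq : ((if t.1 > i then t.1 else i) + 1).toNat = max (i + 1).toNat (t.1.toNat + 1) := by
        split <;> omega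
      simp only [pvL, heq]

theorem pvTriples_pos (peaks : List Int) (labels : List (Option String))
    (hpre : Pre_group_waves_into_heartbeats peaks labels) :
    ∀ t ∈ pvTriples (peaks.zip labels), 0 ≤ t.1 := by
  intro t ht
  rw [pvTriples, List.mem_filterMap] at ht
  obtain ⟨pp, hpp, hmatch⟩ := ht
  obtain ⟨p, lab⟩ := pp
  cases lab with
  | none => simp at hmatch
  | some s =>
      by_cases hs : s = ""
      · simp [hs] at hmatch
      · simp only [hs, if_false] at hmatch
        have h1 := (hpre (p, some s) hpp s rfl hs).2
        have ht1 : t.1 = (pvParseLab s).2 := by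
          cases hmatch; rfl
        rw [ht1]
        unfold pvParseLab
        simp only
        omega

-- ===== VERDICT (by name: the statement is the Claim_ definition above) =====
theorem group_waves_into_heartbeats_spec : Claim_equal_group_waves_into_heartbeats := by
  intro peaks labels _hd hpre
  unfold Spec_group_waves_into_heartbeats
  have hpos := pvTriples_pos peaks labels hpre
  unfold group_waves_into_heartbeats group_waves_into_heartbeats_alt
  rw [pvFoldA, pvMain _ _ hpos]
  simp only [pvFoldB, List.nil_append, List.length_nil, Nat.sub_zero]
  rw [pvMaxNat _ _ (by norm_num) hpos]
  norm_num
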